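-- pv_equiv track=rewrite | github.com/pypi-data/pypi-mirror-401 | packages/aieng-bot/aieng_bot-0.5.0.tar.gz/aieng_bot-0.5.0/src/aieng_bot/check_waiter/waiter.py | _analyze_checks
-- ===== SOURCE A (Python) =====
-- from enum import Enum
-- from typing import Any
--
-- class CheckStatus(str, Enum):
--     """PR check status."""
--
--     COMPLETED = "COMPLETED"
--     FAILED = "FAILED"
--     RUNNING = "RUNNING"
--     NO_CHECKS = "NO_CHECKS"
--     TIMEOUT = "TIMEOUT"
--
-- def _analyze_checks(checks: list[dict[str, Any]]) -> CheckStatus: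
--     """Analyze check rollup data to determine status.
--
--     Args:
--         checks: List of check status objects from GitHub API
--
--     Returns:
--         Overall check status
--
--     """
--     if not checks:
--         return CheckStatus.NO_CHECKS
--
--     # Filter out malformed/stale checks (where both status and conclusion are null)
--     valid_checks = [
--         c
--         for c in checks
--         if c.get("status") is not None or c.get("conclusion") is not None
--     ]
--
--     if not valid_checks:
--         return CheckStatus.NO_CHECKS
--
--     # Check for running/pending/queued checks
--     for check in valid_checks:
--         status = check.get("status")
--         if status in ("IN_PROGRESS", "QUEUED", "PENDING"):
--             return CheckStatus.RUNNING
--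
--     # Check for failures
--     for check in valid_checks:
--         conclusion = check.get("conclusion")
--         if conclusion == "FAILURE":
--             return CheckStatus.FAILED
--
--     # All checks completed successfully
--     return CheckStatus.COMPLETED
-- ===== SOURCE B (Python) =====
-- from enum import Enum
-- from typing import Any
--
-- class CheckStatus(str, Enum):
--     """PR check status."""
--
--     COMPLETED = "COMPLETED"
--     FAILED = "FAILED"
--     RUNNING = "RUNNING"
--     NO_CHECKS = "NO_CHECKS"
--     TIMEOUT = "TIMEOUT"
--
-- def _analyze_checks(checks: list[dict[str, Any]]) -> CheckStatus:
--     """Single pass over checks; decide the overall status after the loop."""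
--     any_valid = saw_running = saw_failure = False
--     for check in checks:
--         status = check.get("status")
--         conclusion = check.get("conclusion")
--         if status is None and conclusion is None:
--             continue  # malformed/stale check
--         any_valid = True
--         saw_running = saw_running or status in ("IN_PROGRESS", "QUEUED", "PENDING")
--         saw_failure = saw_failure or conclusion == "FAILURE"
--     if not checks or not any_valid:
--         return CheckStatus.NO_CHECKS
--     if saw_running:
--         return CheckStatus.RUNNING
--     if saw_failure:
--         return CheckStatus.FAILED
--     return CheckStatus.COMPLETED
-- ===== Notes on version B (the rewrite author's own statement) =====
-- stated objective: simpler
-- what changed: Replaces A's intermediate filtered list plus three separate scans (filter, running scan, failure scan) with one traversal maintaining three flags and a single end-of-loop decision.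
import Mathlib
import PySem

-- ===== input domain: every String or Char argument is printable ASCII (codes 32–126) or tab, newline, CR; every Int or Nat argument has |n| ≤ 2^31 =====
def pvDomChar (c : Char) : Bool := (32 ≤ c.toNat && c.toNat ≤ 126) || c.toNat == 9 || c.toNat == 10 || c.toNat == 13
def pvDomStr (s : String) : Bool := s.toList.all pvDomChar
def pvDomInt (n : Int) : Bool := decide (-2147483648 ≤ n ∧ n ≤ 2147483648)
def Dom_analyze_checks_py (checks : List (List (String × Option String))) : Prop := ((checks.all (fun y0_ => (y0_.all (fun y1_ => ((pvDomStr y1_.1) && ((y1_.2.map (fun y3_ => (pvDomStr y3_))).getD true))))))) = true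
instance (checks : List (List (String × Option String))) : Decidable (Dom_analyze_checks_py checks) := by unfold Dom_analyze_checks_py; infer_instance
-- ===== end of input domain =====

-- B is a single pass keeping three flags instead of A's filtered list plus separate scans; return value only (no mutation).

-- shared helper: Python dict.get(key) on an association list (first match, default None)
def pvGet (c : List (String × Option String)) (k : String) : Option String :=
  match c.find? (fun p => p.1 == k) with
  | some p => p.2
  | none => none

-- ===== PORT A =====
-- the filter predicate of A's list comprehension
def pvValidA (c : List (String × Option String)) : Bool :=
  (pvGet c "status").isSome || (pvGet c "conclusion").isSome

-- A's first for-loop (early return RUNNING modelled as returning true)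
def pvLoopRunning : List (List (String × Option String)) → Bool
  | [] => false
  | c :: rest =>
      let status := pvGet c "status"
      if status = some "IN_PROGRESS" ∨ status = some "QUEUED" ∨ status = some "PENDING" then
        true
      else
        pvLoopRunning rest

-- A's second for-loop (early return FAILED modelled as returning true)
def pvLoopFailure : List (List (String × Option String)) → Bool
  | [] => false
  | c :: rest =>
      let conclusion := pvGet c "conclusion"
      if conclusion = some "FAILURE" then true else pvLoopFailure rest

def analyze_checks_py (checks : List (List (String × Option String))) : String :=
  if checks = [] then "NO_CHECKS"
  else
    let valid_checks := checks.filter pvValidA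
    if valid_checks = [] then "NO_CHECKS"
    else if pvLoopRunning valid_checks then "RUNNING"
    else if pvLoopFailure valid_checks then "FAILED"
    else "COMPLETED"

-- ===== PORT B =====
-- B's loop body: update (any_valid, saw_running, saw_failure)
def pvStepB (st : Bool × Bool × Bool) (c : List (String × Option String)) : Bool × Bool × Bool :=
  let status := pvGet c "status"
  let conclusion := pvGet c "conclusion"
  if status = none ∧ conclusion = none then st
  else
    (true,
     st.2.1 || decide (status = some "IN_PROGRESS" ∨ status = some "QUEUED" ∨ status = some "PENDING"),
     st.2.2 || decide (conclusion = some "FAILURE"))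

def analyze_checks_py_alt (checks : List (List (String × Option String))) : String :=
  let st := checks.foldl pvStepB (false, false, false)
  if checks = [] ∨ st.1 = false then "NO_CHECKS"
  else if st.2.1 then "RUNNING"
  else if st.2.2 then "FAILED"
  else "COMPLETED"

-- ===== PRECONDITION & SPEC =====
def Spec_analyze_checks_py (checks : List (List (String × Option String))) (out : String) : Prop := out = analyze_checks_py_alt checks
instance (checks : List (List (String × Option String))) (out : String) : Decidable (Spec_analyze_checks_py checks out) := by unfold Spec_analyze_checks_py; infer_instance

-- ===== CLAIM (what is proved, stated in full; the proofs are below) =====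
def Claim_equal_analyze_checks_py : Prop := ∀ (checks : List (List (String × Option String))), Dom_analyze_checks_py checks → Spec_analyze_checks_py checks (analyze_checks_py checks)

-- ===== LEMMAS AND PROOFS =====

def pvIsRunning (c : List (String × Option String)) : Bool :=
  decide (pvGet c "status" = some "IN_PROGRESS" ∨ pvGet c "status" = some "QUEUED" ∨ pvGet c "status" = some "PENDING")

def pvIsFail (c : List (String × Option String)) : Bool :=
  decide (pvGet c "conclusion" = some "FAILURE")

lemma pvLoopRunning_eq_any (l : List (List (String × Option String))) :
    pvLoopRunning l = l.any pvIsRunning := by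
  induction l with
  | nil => rfl
  | cons c rest ih =>
      simp only [pvLoopRunning, List.any_cons, pvIsRunning]
      split_ifs with h
      · simp [h]
      · simp [h, ih]

lemma pvLoopFailure_eq_any (l : List (List (String × Option String))) :
    pvLoopFailure l = l.any pvIsFail := by
  induction l with
  | nil => rfl
  | cons c rest ih =>
      simp only [pvLoopFailure, List.any_cons, pvIsFail]
      split_ifs with h
      · simp [h]
      · simp [h, ih]

lemma pvStepB_eq (st : Bool × Bool × Bool) (c : List (String × Option String)) :
    pvStepB st c = (st.1 || pvValidA c, st.2.1 || (pvValidA c && pvIsRunning c),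
                    st.2.2 || (pvValidA c && pvIsFail c)) := by
  simp only [pvStepB, pvValidA, pvIsRunning, pvIsFail]
  split_ifs with h
  · obtain ⟨h1, h2⟩ := h
    simp [h1, h2]
  · rw [not_and_or] at h
    rcases h with h | h <;>
      · cases hs : pvGet c "status" <;> cases hc : pvGet c "conclusion" <;>
          simp_all [Option.isSome]

lemma foldl_pvStepB (l : List (List (String × Option String))) (a b c : Bool) :
    l.foldl pvStepB (a, b, c) =
      (a || l.any pvValidA,
       b || l.any (fun x => pvValidA x && pvIsRunning x),
       c || l.any (fun x => pvValidA x && pvIsFail x)) := by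
  induction l generalizing a b c with
  | nil => simp
  | cons x rest ih =>
      simp only [List.foldl_cons, pvStepB_eq, ih, List.any_cons]
      simp [Bool.or_assoc]

lemma running_valid (c : List (String × Option String)) (h : pvIsRunning c = true) :
    pvValidA c = true := by
  simp only [pvIsRunning, decide_eq_true_eq] at h
  rcases h with h | h | h <;> simp [pvValidA, h]

lemma fail_valid (c : List (String × Option String)) (h : pvIsFail c = true) :
    pvValidA c = true := by
  simp only [pvIsFail, decide_eq_true_eq] at h
  simp [pvValidA, h]

lemma valid_and_running (c : List (String × Option String)) :
    (pvValidA c && pvIsRunning c) = pvIsRunning c := by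
  cases hr : pvIsRunning c
  · simp
  · simp [running_valid c hr]

lemma valid_and_fail (c : List (String × Option String)) :
    (pvValidA c && pvIsFail c) = pvIsFail c := by
  cases hr : pvIsFail c
  · simp
  · simp [fail_valid c hr]

-- ===== VERDICT (by name: the statement is the Claim_ definition above) =====
theorem analyze_checks_py_spec : Claim_equal_analyze_checks_py := by
  intro checks _
  unfold Spec_analyze_checks_py analyze_checks_py analyze_checks_py_alt
  simp only [foldl_pvStepB, Bool.false_or, pvLoopRunning_eq_any, pvLoopFailure_eq_any,
    List.any_filter, valid_and_running, valid_and_fail]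
  by_cases hnil : checks = []
  · simp [hnil]
  · simp only [hnil, if_false, false_or]
    by_cases hv : checks.any pvValidA
    · have hfil : checks.filter pvValidA ≠ [] := by
        simp only [List.any_eq_true] at hv
        obtain ⟨x, hx, hpx⟩ := hv
        intro h
        have : x ∈ checks.filter pvValidA := List.mem_filter.mpr ⟨hx, hpx⟩
        simp [h] at this
      rw [if_neg hfil]
      simp [hv]
    · have hfil : checks.filter pvValidA = [] := by
        rw [List.filter_eq_nil_iff]
        intro x hx
        intro hc
        exact hv (List.any_eq_true.mpr ⟨x, hx, hc⟩)
      simp only [Bool.not_eq_true] at hv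
      simp [hfil, hv]
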